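-- pv_equiv track=rewrite | github.com/yandri918/streamlit_terbaru | budidaya_cabe_streamlit/services/quality_control_service.py | _get_inspection_recommendations
-- ===== SOURCE A (Python) =====
-- def _get_inspection_recommendations(failed_items):
--     """Generate recommendations based on failed items"""
--     recs = []
--
--     if not failed_items:
--         return ["Semua item lolos inspeksi - pertahankan standar kualitas"]
--
--     for item in failed_items:
--         if 'hama' in item.lower():
--             recs.append("Tingkatkan pengendalian hama - gunakan Module 09")
--         elif 'penyakit' in item.lower():
--             recs.append("Lakukan treatment penyakit sebelum panen")
--         elif 'kematangan' in item.lower():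
--             recs.append("Tunda panen hingga kematangan optimal")
--         elif 'cuaca' in item.lower():
--             recs.append("Pilih waktu panen saat cuaca cerah")
--         elif 'bersih' in item.lower():
--             recs.append("Pastikan kebersihan peralatan dan wadah")
--
--     if not recs:
--         recs.append("Perbaiki item yang gagal sebelum melanjutkan")
--
--     return recs
-- ===== SOURCE B (Python) =====
-- _KEYS = ["hama", "penyakit", "kematangan", "cuaca", "bersih"]
-- _RECS = [
--     "Tingkatkan pengendalian hama - gunakan Module 09",
--     "Lakukan treatment penyakit sebelum panen",
--     "Tunda panen hingga kematangan optimal",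
--     "Pilih waktu panen saat cuaca cerah",
--     "Pastikan kebersihan peralatan dan wadah",
-- ]
--
--
-- def _get_inspection_recommendations(failed_items):
--     if not failed_items:
--         return ["Semua item lolos inspeksi - pertahankan standar kualitas"]
--     lows = [item.lower() for item in failed_items]
--     # rule-outer sweep: from lowest to highest priority, overwrite each item's
--     # best rule index, so the highest-priority (smallest) match wins last
--     best = [None] * len(lows)
--     for k in range(len(_KEYS) - 1, -1, -1):
--         key = _KEYS[k]
--         best = [k if key in low else b for low, b in zip(lows, best)]
--     recs = [_RECS[k] for k in best if k is not None]
--     return recs or ["Perbaiki item yang gagal sebelum melanjutkan"]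
-- ===== Notes on version B (the rewrite author's own statement) =====
-- stated objective: alternative
-- what changed: Replaces A's per-item first-match if/elif chain by a rule-outer sweep: lowercase all items once, then for each keyword from lowest to highest priority overwrite a per-item best-rule-index array (last write = highest priority), finally map surviving indices to recommendations.
import Mathlib
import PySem

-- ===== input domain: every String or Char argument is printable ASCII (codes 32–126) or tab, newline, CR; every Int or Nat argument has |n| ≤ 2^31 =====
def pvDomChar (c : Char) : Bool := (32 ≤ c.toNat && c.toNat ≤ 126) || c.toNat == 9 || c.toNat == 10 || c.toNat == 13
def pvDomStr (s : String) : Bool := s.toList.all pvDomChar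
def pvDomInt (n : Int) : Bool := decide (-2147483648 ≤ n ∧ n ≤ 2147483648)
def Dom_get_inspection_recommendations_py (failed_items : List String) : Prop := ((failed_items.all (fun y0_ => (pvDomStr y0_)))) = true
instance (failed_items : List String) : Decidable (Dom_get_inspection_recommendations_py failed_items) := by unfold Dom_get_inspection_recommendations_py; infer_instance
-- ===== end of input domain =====

-- B replaces A's per-item if/elif chain by a rule-outer sweep that overwrites a
-- per-item best-rule-index array from lowest to highest priority (objective: alternative; same cost).

-- ===== PORT A =====
-- one iteration of A's for-loop: the if/elif chain appending to recs
def pvAStep (recs : List String) (item : String) : List String :=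
  if PySem.Str.isIn "hama" (PySem.Str.lower item) then
    recs ++ ["Tingkatkan pengendalian hama - gunakan Module 09"]
  else if PySem.Str.isIn "penyakit" (PySem.Str.lower item) then
    recs ++ ["Lakukan treatment penyakit sebelum panen"]
  else if PySem.Str.isIn "kematangan" (PySem.Str.lower item) then
    recs ++ ["Tunda panen hingga kematangan optimal"]
  else if PySem.Str.isIn "cuaca" (PySem.Str.lower item) then
    recs ++ ["Pilih waktu panen saat cuaca cerah"]
  else if PySem.Str.isIn "bersih" (PySem.Str.lower item) then
    recs ++ ["Pastikan kebersihan peralatan dan wadah"]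
  else recs

def get_inspection_recommendations_py (failed_items : List String) : List String :=
  if failed_items = [] then
    ["Semua item lolos inspeksi - pertahankan standar kualitas"]
  else
    let recs := failed_items.foldl pvAStep []
    if recs = [] then ["Perbaiki item yang gagal sebelum melanjutkan"] else recs

-- ===== PORT B =====
-- Source B's _KEYS[k] and _RECS[k]
def pvKey : Nat → String
  | 0 => "hama" | 1 => "penyakit" | 2 => "kematangan" | 3 => "cuaca" | _ => "bersih"

def pvRec : Nat → String
  | 0 => "Tingkatkan pengendalian hama - gunakan Module 09"
  | 1 => "Lakukan treatment penyakit sebelum panen"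
  | 2 => "Tunda panen hingga kematangan optimal"
  | 3 => "Pilih waktu panen saat cuaca cerah"
  | _ => "Pastikan kebersihan peralatan dan wadah"

-- one sweep of Source B's rule-outer loop: overwrite each item's best index with k where _KEYS[k] matches
def pvSweep (lows : List String) (best : List (Option Nat)) (k : Nat) : List (Option Nat) :=
  (lows.zip best).map (fun p => if PySem.Str.isIn (pvKey k) p.1 then some k else p.2)

def get_inspection_recommendations_py_alt (failed_items : List String) : List String :=
  if failed_items = [] then
    ["Semua item lolos inspeksi - pertahankan standar kualitas"]
  else
    let lows := failed_items.map PySem.Str.lower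
    let best := [4, 3, 2, 1, 0].foldl (pvSweep lows) (lows.map (fun _ => none))
    let recs := best.filterMap (fun b => b.map pvRec)
    if recs = [] then ["Perbaiki item yang gagal sebelum melanjutkan"] else recs

-- ===== PRECONDITION & SPEC =====
def Spec_get_inspection_recommendations_py (failed_items : List String) (out : List String) : Prop := out = get_inspection_recommendations_py_alt failed_items
instance (failed_items : List String) (out : List String) : Decidable (Spec_get_inspection_recommendations_py failed_items out) := by unfold Spec_get_inspection_recommendations_py; infer_instance

-- ===== CLAIM (what is proved, stated in full; the proofs are below) =====
def Claim_equal_get_inspection_recommendations_py : Prop := ∀ (failed_items : List String), Dom_get_inspection_recommendations_py failed_items → Spec_get_inspection_recommendations_py failed_items (get_inspection_recommendations_py failed_items)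

-- ===== LEMMAS AND PROOFS =====
-- A's per-item choice, as an Option
def pvFirst (item : String) : Option String :=
  if PySem.Str.isIn "hama" (PySem.Str.lower item) then
    some "Tingkatkan pengendalian hama - gunakan Module 09"
  else if PySem.Str.isIn "penyakit" (PySem.Str.lower item) then
    some "Lakukan treatment penyakit sebelum panen"
  else if PySem.Str.isIn "kematangan" (PySem.Str.lower item) then
    some "Tunda panen hingga kematangan optimal"
  else if PySem.Str.isIn "cuaca" (PySem.Str.lower item) then
    some "Pilih waktu panen saat cuaca cerah"
  else if PySem.Str.isIn "bersih" (PySem.Str.lower item) then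
    some "Pastikan kebersihan peralatan dan wadah"
  else none

theorem pvAStep_eq (recs : List String) (item : String) :
    pvAStep recs item = recs ++ (pvFirst item).toList := by
  simp only [pvAStep, pvFirst]
  split_ifs <;> simp

theorem pvFoldl_eq (items : List String) (recs : List String) :
    items.foldl pvAStep recs = recs ++ items.filterMap pvFirst := by
  induction items generalizing recs with
  | nil => simp
  | cons x xs ih =>
      simp only [List.foldl_cons, List.filterMap_cons, pvAStep_eq]
      cases h : pvFirst x <;> simp [ih]

-- the sweeps act pointwise: the folded best array is a map over the items
theorem pvSweep_map (lows : List String) (g : String → Option Nat) (k : Nat) :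
    pvSweep lows (lows.map g) k
      = lows.map (fun low => if PySem.Str.isIn (pvKey k) low then some k else g low) := by
  simp [pvSweep, List.zip_map_right]
  induction lows with
  | nil => rfl
  | cons x xs ih => simp [ih]

theorem pvFold_sweeps (ks : List Nat) (lows : List String) (g : String → Option Nat) :
    ks.foldl (pvSweep lows) (lows.map g)
      = lows.map (fun low => ks.foldl
          (fun b k => if PySem.Str.isIn (pvKey k) low then some k else b) (g low)) := by
  induction ks generalizing g with
  | nil => rfl
  | cons k ks ih =>
      simp only [List.foldl_cons, pvSweep_map]
      exact ih _

-- per item, B's overwritten index maps to exactly A's first-match recommendation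
theorem pvPointwise (item : String) :
    (([4, 3, 2, 1, 0] : List Nat).foldl
        (fun b k => if PySem.Str.isIn (pvKey k) (PySem.Str.lower item) then some k else b)
        none).map pvRec = pvFirst item := by
  simp only [List.foldl_cons, List.foldl_nil, pvKey, pvFirst]
  split_ifs <;> simp [pvRec]

-- ===== VERDICT (by name: the statement is the Claim_ definition above) =====
theorem get_inspection_recommendations_py_spec : Claim_equal_get_inspection_recommendations_py := by
  intro failed_items _
  unfold Spec_get_inspection_recommendations_py get_inspection_recommendations_py
    get_inspection_recommendations_py_alt
  simp only [pvFoldl_eq, pvFold_sweeps, List.nil_append, List.filterMap_map]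
  have : (fun low => (([4, 3, 2, 1, 0] : List Nat).foldl
        (fun b k => if PySem.Str.isIn (pvKey k) low then some k else b) none).map pvRec)
        ∘ PySem.Str.lower = pvFirst := by
    funext item
    exact pvPointwise item
  simp [Function.comp_def, ← this]
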